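-- pv_equiv track=rewrite | github.com/samuel-britten/symbook | symbook.py | process_latex
-- ===== SOURCE A (Python) =====
-- def process_latex(expr):
--     """Convert LaTeX expressions to JavaScript math"""
--     # Handle expressions with curly braces in exponents
--     while '{' in expr and '}' in expr:
--         start = expr.find('^{')
--         if start != -1:
--             # Find matching closing brace
--             count = 1
--             end = start + 2
--             while count > 0 and end < len(expr):
--                 if expr[end] == '{':
--                     count += 1
--                 elif expr[end] == '}':
--                     count -= 1
--                 end += 1
--
--             if count == 0:
--                 # Replace ^{...} with ^(...)
--                 power = expr[start+2:end-1]
--                 expr = expr[:start] + '^(' + power + ')' + expr[end:]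
--         else:
--             break
--
--     return expr
-- ===== SOURCE B (Python) =====
-- def process_latex(expr):
--     """Convert LaTeX expressions to JavaScript math"""
--     # One left-to-right pass: a stack of open-brace positions (with a flag
--     # "was preceded by '^'"); on a matching '}' rewrite the pair to '(' ')'.
--     out = []
--     stack = []
--     prev_caret = False
--     for c in expr:
--         if c == '{':
--             stack.append((len(out), prev_caret))
--             out.append(c)
--         elif c == '}':
--             if stack:
--                 j, caret = stack.pop()
--                 if caret:
--                     out[j] = '('
--                     out.append(')')
--                 else:
--                     out.append(c)
--             else:
--                 out.append(c)
--         else: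
--             out.append(c)
--         prev_caret = (c == '^')
--     return ''.join(out)
-- ===== Notes on version B (the rewrite author's own statement) =====
-- stated objective: alternative
-- what changed: A repeatedly rescans and rebuilds the whole string once per exponent group (locate the next caret-brace start, re-count braces, splice); B makes one left-to-right pass keeping a stack of open-brace positions and rewrites each matched pair in place, linear in the string length, at the cost of a per-character Python loop.
import Mathlib
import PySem

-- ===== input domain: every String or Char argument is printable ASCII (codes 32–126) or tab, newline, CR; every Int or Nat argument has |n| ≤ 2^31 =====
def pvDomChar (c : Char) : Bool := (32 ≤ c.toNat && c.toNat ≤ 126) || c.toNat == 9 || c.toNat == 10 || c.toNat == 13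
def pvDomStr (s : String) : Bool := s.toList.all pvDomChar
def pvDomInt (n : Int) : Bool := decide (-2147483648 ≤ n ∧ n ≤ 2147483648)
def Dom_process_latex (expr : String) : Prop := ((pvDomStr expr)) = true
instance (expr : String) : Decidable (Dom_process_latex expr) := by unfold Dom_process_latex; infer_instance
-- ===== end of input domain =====

-- B replaces A's repeated find-and-splice passes by a single left-to-right pass with a
-- stack of open-brace positions; equivalence is proved on Pre_ (A diverges outside it).

-- ===== PORT A =====
-- expr.find('^{'): leftmost index of the substring, none for Python's -1
def findPow : List Char → Option Nat
  | c₁ :: c₂ :: rest =>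
      if c₁ = '^' ∧ c₂ = '{' then some 0
      else (findPow (c₂ :: rest)).map (· + 1)
  | _ => none

-- the inner `while count > 0 and end < len(expr)` scan; returns (final count, chars consumed)
def aScan (count : Int) : List Char → Int × Nat
  | [] => (count, 0)
  | c :: rs =>
      if count ≤ 0 then (count, 0)
      else
        let count' := if c = '{' then count + 1 else if c = '}' then count - 1 else count
        ((aScan count' rs).1, (aScan count' rs).2 + 1)

-- the outer `while '{' in expr and '}' in expr` loop; each replacement removes one '{',
-- so fuel = (count of '{') + 1 suffices on every input where the Python loop terminates
-- (where Python loops forever — excluded by Pre_ — the fuel runs out).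
-- Slices use nonnegative in-range indices only, ported as take/drop.
def aLoop : Nat → List Char → List Char
  | 0, s => s
  | fuel + 1, s =>
      if '{' ∈ s ∧ '}' ∈ s then
        match findPow s with
        | some start =>
            let p := aScan 1 (s.drop (start + 2))
            if p.1 = 0 then
              let power := (s.drop (start + 2)).take (p.2 - 1)
              aLoop fuel (s.take start ++ '^' :: '(' :: power ++ ')' :: s.drop (start + 2 + p.2))
            else aLoop fuel s
        | none => s
      else s

def process_latex (expr : String) : String :=
  String.ofList (aLoop (expr.toList.count '{' + 1) expr.toList)

-- ===== PORT B =====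
-- one step of B's for-loop: state = (out, stack of (position, was-preceded-by-'^'), prev_caret)
def bStep (st : List Char × List (Nat × Bool) × Bool) (c : Char) :
    List Char × List (Nat × Bool) × Bool :=
  let out := st.1
  let stk := st.2.1
  let p := st.2.2
  if c = '{' then (out ++ [c], (out.length, p) :: stk, c == '^')
  else if c = '}' then
    match stk with
    | [] => (out ++ [c], [], c == '^')
    | (j, caret) :: rest =>
        if caret then ((out.set j '(') ++ [')'], rest, c == '^')
        else (out ++ [c], rest, c == '^')
  else (out ++ [c], stk, c == '^')

def process_latex_alt (expr : String) : String :=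
  String.ofList (expr.toList.foldl bStep ([], [], false)).1

-- ===== PRECONDITION & SPEC =====
-- brace balance: #'{' - #'}'
def pvBal (l : List Char) : Int := (l.count '{' : Int) - (l.count '}' : Int)

-- an occurrence of the two-character exponent-opener pattern (caret, open brace) at index i
def isPowAt (s : List Char) (i : Nat) : Prop := (s.drop i).take 2 = ['^', '{']

-- p is the position of the close brace matching the open brace of the exponent opener at j
-- (the first point where A's forward brace count returns to 0)
def matcherAt (s : List Char) (j p : Nat) : Prop :=
  isPowAt s j ∧ j + 2 ≤ p ∧ pvBal ((s.drop (j + 2)).take (p - (j + 2) + 1)) = -1 ∧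
    ∀ k ≤ p - (j + 2), 0 ≤ pvBal ((s.drop (j + 2)).take k)

-- Pre_ excludes EXACTLY the inputs on which A's outer while-loop never terminates:
-- those containing an exponent opener (caret immediately followed by an open brace)
-- with no matching close brace, together with some close brace that is not the matcher
-- of a matched exponent opener further left; A never returns on those inputs.
def Pre_process_latex (expr : String) : Prop :=
  ∀ i < expr.toList.length, isPowAt expr.toList i →
    ¬ (∃ n ≤ expr.toList.length, pvBal ((expr.toList.drop (i + 2)).take n) = -1) →
    ∀ p < expr.toList.length, expr.toList.getD p ' ' = '}' →
      ∃ j < i, matcherAt expr.toList j p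

instance (expr : String) : Decidable (Pre_process_latex expr) := by
  unfold Pre_process_latex matcherAt isPowAt; exact Nat.decidableBallLT _ _

def pvWitness_process_latex : String := "x^{a^{2}}+1"

def Spec_process_latex (expr : String) (out : String) : Prop := out = process_latex_alt expr
instance (expr : String) (out : String) : Decidable (Spec_process_latex expr out) := by unfold Spec_process_latex; infer_instance

-- ===== CLAIM (what is proved, stated in full; the proofs are below) =====
def Claim_equal_process_latex : Prop := ∀ (expr : String), Dom_process_latex expr → Pre_process_latex expr → Spec_process_latex expr (process_latex expr)

-- ===== LEMMAS AND PROOFS =====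

-- an unmatched-scan check without the length bound (equivalent: take saturates)
def matchedAt' (s : List Char) (i : Nat) : Prop :=
  ∃ n, pvBal ((s.drop (i + 2)).take n) = -1

-- the loop invariant: every close brace visible to an unmatched exponent opener is the
-- matcher of an earlier matched one (A's loop consumes them before stalling harmlessly)
def pvInv (s : List Char) : Prop :=
  ∀ i, isPowAt s i → ¬ matchedAt' s i → ∀ p, s[p]? = some '}' → ∃ j < i, matcherAt s j p

theorem pvBal_append (a b : List Char) : pvBal (a ++ b) = pvBal a + pvBal b := by
  simp [pvBal, List.count_append]; ring

theorem pvBal_nil : pvBal [] = 0 := by simp [pvBal]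

theorem pvBal_cons (c : Char) (l : List Char) :
    pvBal (c :: l) = pvBal [c] + pvBal l := by
  simpa using pvBal_append [c] l

theorem pvBal_single (c : Char) :
    pvBal [c] = if c = '{' then 1 else if c = '}' then -1 else 0 := by
  by_cases h1 : c = '{' <;> by_cases h2 : c = '}' <;>
    simp_all [pvBal]

theorem pvBal_cons' (c : Char) (l : List Char) :
    pvBal (c :: l) = (if c = '{' then 1 else if c = '}' then -1 else 0) + pvBal l := by
  rw [pvBal_cons, pvBal_single]

-- discrete downward IVT for the balance of prefixes
theorem bal_reach : ∀ (l : List Char) (v : Int), pvBal l ≤ v → v ≤ 0 →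
    ∃ n ≤ l.length, pvBal (l.take n) = v := by
  intro l
  induction l with
  | nil =>
      intro v h1 h2
      rw [pvBal_nil] at h1
      exact ⟨0, by simp, by rw [List.take_nil, pvBal_nil]; omega⟩
  | cons c rs ih =>
      intro v h1 h2
      by_cases hv : v = 0
      · exact ⟨0, by simp, by rw [List.take_zero, pvBal_nil, hv]⟩
      · have hv1 : v ≤ -1 := by omega
        rw [pvBal_cons, pvBal_single] at h1
        by_cases h1c : c = '{'
        · rw [if_pos h1c] at h1
          obtain ⟨n, hn, he⟩ := ih (v - 1) (by omega) (by omega)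
          exact ⟨n + 1, by simpa using hn, by
            rw [List.take_succ_cons, pvBal_cons, he, pvBal_single, if_pos h1c]; ring⟩
        · by_cases h2c : c = '}'
          · rw [if_neg h1c, if_pos h2c] at h1
            by_cases hvm : v = -1
            · refine ⟨1, by simp, ?_⟩
              rw [show (c :: rs).take 1 = [c] by simp, pvBal_single,
                if_neg h1c, if_pos h2c, hvm]
            · obtain ⟨n, hn, he⟩ := ih (v + 1) (by omega) (by omega)
              exact ⟨n + 1, by simpa using hn, by
                rw [List.take_succ_cons, pvBal_cons, he, pvBal_single,
                  if_neg h1c, if_pos h2c]; ring⟩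
          · rw [if_neg h1c, if_neg h2c] at h1
            obtain ⟨n, hn, he⟩ := ih v (by omega) h2
            exact ⟨n + 1, by simpa using hn, by
              rw [List.take_succ_cons, pvBal_cons, he, pvBal_single,
                if_neg h1c, if_neg h2c]; ring⟩

-- ---- bStep unfolding lemmas ----
theorem bStep_open (out : List Char) (stk : List (Nat × Bool)) (p : Bool) :
    bStep (out, stk, p) '{' = (out ++ ['{'], (out.length, p) :: stk, false) := by
  simp [bStep]

theorem bStep_close_nil (out : List Char) (p : Bool) :
    bStep (out, [], p) '}' = (out ++ ['}'], [], false) := by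
  simp [bStep]

theorem bStep_close_true (out : List Char) (j : Nat) (st : List (Nat × Bool)) (p : Bool) :
    bStep (out, (j, true) :: st, p) '}' = ((out.set j '(') ++ [')'], st, false) := by
  simp [bStep]

theorem bStep_close_false (out : List Char) (j : Nat) (st : List (Nat × Bool)) (p : Bool) :
    bStep (out, (j, false) :: st, p) '}' = (out ++ ['}'], st, false) := by
  simp [bStep]

theorem bStep_other (out : List Char) (stk : List (Nat × Bool)) (p : Bool) (c : Char)
    (h1 : c ≠ '{') (h2 : c ≠ '}') :
    bStep (out, stk, p) c = (out ++ [c], stk, c == '^') := by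
  simp [bStep, h1, h2]

-- ---- B is the identity when there is no '}' ----
theorem fold_no_close : ∀ (s out : List Char) (stk : List (Nat × Bool)) (p : Bool),
    '}' ∉ s → (s.foldl bStep (out, stk, p)).1 = out ++ s := by
  intro s
  induction s with
  | nil => intro out stk p _; simp
  | cons c rs ih =>
      intro out stk p h
      have hc : c ≠ '}' := fun hh => h (by simp [hh])
      have hrs : '}' ∉ rs := fun hh => h (by simp [hh])
      by_cases hb : c = '{'
      · subst hb
        rw [List.foldl_cons, bStep_open, ih _ _ _ hrs]
        simp
      · rw [List.foldl_cons, bStep_other _ _ _ _ hb hc, ih _ _ _ hrs]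
        simp

-- ---- findPow facts ----
theorem findPow_cons_none (c : Char) (rs : List Char) (h : findPow (c :: rs) = none) :
    (c = '^' → rs.head? ≠ some '{') ∧ findPow rs = none := by
  cases rs with
  | nil => exact ⟨fun _ => by simp, rfl⟩
  | cons c₂ rest =>
      rw [findPow] at h
      split_ifs at h with hif
      rw [Option.map_eq_none_iff] at h
      exact ⟨fun h1 h2 => hif ⟨h1, by simpa using h2⟩, h⟩

theorem isPowAt_cons_succ (c : Char) (s : List Char) (i : Nat) :
    isPowAt (c :: s) (i + 1) ↔ isPowAt s i := by
  simp [isPowAt]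

theorem isPowAt_len (s : List Char) (i : Nat) (h : isPowAt s i) : i + 2 ≤ s.length := by
  have := congrArg List.length h
  simp [List.length_take, List.length_drop] at this
  omega

theorem isPowAt_decomp (s : List Char) (i : Nat) (h : isPowAt s i) :
    s = s.take i ++ '^' :: '{' :: s.drop (i + 2) := by
  conv_lhs => rw [← List.take_append_drop i s]
  congr 1
  have hd : s.drop i = (s.drop i).take 2 ++ (s.drop i).drop 2 := by
    rw [List.take_append_drop]
  rw [hd, h, List.drop_drop]
  simp

-- ---- B is the identity when there is no "^{" ----
theorem fold_no_pow : ∀ (s out : List Char) (stk : List (Nat × Bool)) (p : Bool),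
    findPow s = none → (∀ e ∈ stk, e.2 = false) → (p = true → s.head? ≠ some '{') →
    (s.foldl bStep (out, stk, p)).1 = out ++ s := by
  intro s
  induction s with
  | nil => intro out stk p _ _ _; simp
  | cons c rs ih =>
      intro out stk p hf hstk hp
      obtain ⟨hnp, hfrs⟩ := findPow_cons_none c rs hf
      by_cases hb : c = '{'
      · subst hb
        have hpf : p = false := by
          cases p
          · rfl
          · exact absurd (by simp : ('{' :: rs).head? = some '{') (hp rfl)
        subst hpf
        rw [List.foldl_cons, bStep_open,
          ih _ _ _ hfrs (by
            intro e he
            cases List.mem_cons.mp he with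
            | inl h => rw [h]
            | inr h => exact hstk e h) (by simp)]
        simp
      · by_cases hc : c = '}'
        · subst hc
          cases stk with
          | nil =>
              rw [List.foldl_cons, bStep_close_nil, ih _ _ _ hfrs (by simp) (by simp)]
              simp
          | cons e st =>
              have he : e.2 = false := hstk e (by simp)
              obtain ⟨j, flag⟩ := e
              simp only at he
              subst he
              rw [List.foldl_cons, bStep_close_false,
                ih _ _ _ hfrs (fun e he => hstk e (by simp [he])) (by simp)]
              simp
        · rw [List.foldl_cons, bStep_other _ _ _ _ hb hc,
            ih _ _ _ hfrs hstk (by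
              intro hpc
              have : c = '^' := by simpa using hpc
              exact hnp this)]
          simp

theorem findPow_some_spec : ∀ (s : List Char) (k : Nat), findPow s = some k →
    isPowAt s k ∧ ∀ j < k, ¬ isPowAt s j := by
  intro s
  induction s with
  | nil => intro k h; exact absurd h (by simp [findPow])
  | cons c rs ih =>
      intro k h
      cases rs with
      | nil => exact absurd h (by simp [findPow])
      | cons c₂ rest =>
          rw [findPow] at h
          split_ifs at h with hif
          · obtain ⟨h1, h2⟩ := hif
            have hk : k = 0 := by simpa using h.symm
            subst hk
            exact ⟨by simp [isPowAt, h1, h2], by omega⟩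
          · simp only [Option.map_eq_some_iff] at h
            obtain ⟨k', hk', hkk⟩ := h
            obtain ⟨hpow, hmin⟩ := ih k' hk'
            subst hkk
            refine ⟨(isPowAt_cons_succ _ _ _).mpr hpow, ?_⟩
            intro j hj
            cases j with
            | zero =>
                intro hp
                have : c = '^' ∧ c₂ = '{' := by
                  have := hp
                  simp [isPowAt] at this
                  exact this
                exact hif this
            | succ j' =>
                intro hp
                exact hmin j' (by omega) ((isPowAt_cons_succ _ _ _).mp hp)

-- ---- characterisation of A's inner count scan ----
theorem aScan_nonpos (rs : List Char) (count : Int) (h : count ≤ 0) :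
    aScan count rs = (count, 0) := by
  cases rs with
  | nil => rfl
  | cons c rs' => rw [aScan, if_pos h]

theorem count_step (count : Int) (c : Char) :
    (if c = '{' then count + 1 else if c = '}' then count - 1 else count)
      = count + pvBal [c] := by
  rw [pvBal_single]
  split_ifs <;> ring

theorem aScan_run : ∀ (rest : List Char) (count : Int) (m : Nat), 0 < count →
    m < rest.length → count + pvBal (rest.take (m + 1)) = 0 →
    (∀ k ≤ m, 0 < count + pvBal (rest.take k)) →
    aScan count rest = (0, m + 1) := by
  intro rest
  induction rest with
  | nil => intro count m _ hm _ _; simp at hm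
  | cons c rs ih =>
      intro count m hc hm hz hpre
      rw [aScan, if_neg (by omega)]
      simp only [count_step]
      cases m with
      | zero =>
          have h0 : count + pvBal [c] = 0 := by
            have := hz
            rw [List.take_succ_cons, List.take_zero] at this
            rw [pvBal_cons, pvBal_nil] at this
            omega
          rw [show ((c :: rs).take 1) = [c] by simp] at hz
          have : aScan (count + pvBal [c]) rs = (count + pvBal [c], 0) :=
            aScan_nonpos _ _ (by omega)
          rw [this]
          simp [h0]
      | succ m' =>
          have hstep : 0 < count + pvBal [c] := by
            have := hpre 1 (by omega)
            rw [show ((c :: rs).take 1) = [c] by simp] at this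
            exact this
          have hrec : aScan (count + pvBal [c]) rs = (0, m' + 1) := by
            apply ih _ m' hstep (by simpa using hm)
            · rw [List.take_succ_cons, pvBal_cons] at hz; omega
            · intro k hk
              have := hpre (k + 1) (by omega)
              rw [List.take_succ_cons, pvBal_cons] at this
              omega
          rw [hrec]

-- given a matching '}' exists, A's scan succeeds and splits rest = P ++ '}' :: suf with P balanced
theorem matched_run (rest : List Char) (h : ∃ n, pvBal (rest.take n) = -1) :
    ∃ m, m < rest.length ∧ aScan 1 rest = (0, m + 1) ∧
      pvBal (rest.take m) = 0 ∧ (∀ t, t <+: rest.take m → 0 ≤ pvBal t) ∧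
      rest = rest.take m ++ '}' :: rest.drop (m + 1) := by
  have hex : ∃ n, pvBal (rest.take n) = -1 := h
  classical
  let n₀ := Nat.find hex
  have hn₀ : pvBal (rest.take n₀) = -1 := Nat.find_spec hex
  have hmin : ∀ k < n₀, pvBal (rest.take k) ≠ -1 := fun k hk => Nat.find_min hex hk
  have hle : n₀ ≤ rest.length := by
    by_contra hgt
    push_neg at hgt
    have : pvBal (rest.take rest.length) = -1 := by
      rw [List.take_of_length_le (le_refl _)]
      rw [List.take_of_length_le (by omega)] at hn₀
      exact hn₀
    exact hmin rest.length hgt this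
  have hpos : n₀ ≠ 0 := by
    intro h0
    rw [h0, List.take_zero, pvBal_nil] at hn₀
    omega
  obtain ⟨m, hm⟩ : ∃ m, n₀ = m + 1 := ⟨n₀ - 1, by omega⟩
  have hmlt : m < rest.length := by omega
  have hprefix : ∀ k ≤ m, 0 ≤ pvBal (rest.take k) := by
    intro k hk
    by_contra hneg
    push_neg at hneg
    obtain ⟨n, hn, he⟩ := bal_reach (rest.take k) (-1) (by omega) (by omega)
    rw [List.take_take] at he
    have hnk : min n k = n := by
      rw [List.length_take] at hn
      omega
    rw [hnk] at he
    exact hmin n (by rw [List.length_take] at hn; omega) he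
  have hsplit : rest.take (m + 1) = rest.take m ++ [rest[m]] :=
    List.take_succ_eq_append_getElem hmlt
  have hbalm : pvBal (rest.take m) = 0 ∧ rest[m] = '}' := by
    rw [hm, hsplit, pvBal_append, pvBal_single] at hn₀
    have h0 : 0 ≤ pvBal (rest.take m) := hprefix m (le_refl m)
    constructor
    · split_ifs at hn₀ <;> omega
    · by_contra hne
      have h1 : ¬ rest[m] = '}' := hne
      split_ifs at hn₀ <;> omega
  refine ⟨m, hmlt, ?_, hbalm.1, ?_, ?_⟩
  · apply aScan_run rest 1 m (by omega) hmlt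
    · rw [hm] at hn₀; omega
    · intro k hk
      have := hprefix k hk
      omega
  · intro t ht
    have hlt : t.length ≤ m := by
      have := ht.length_le
      rw [List.length_take] at this
      omega
    rw [List.prefix_iff_eq_take.mp ht, List.take_take,
      show min t.length m = t.length by omega]
    exact hprefix t.length hlt
  · conv_lhs => rw [← List.take_append_drop m rest]
    congr 1
    rw [List.drop_eq_getElem_cons hmlt, hbalm.2]

-- Dyck decomposition: a balanced prefix-nonnegative word starting with '{'
theorem dyck (rest : List Char) (hpre : ∀ t, t <+: ('{' :: rest) → 0 ≤ pvBal t)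
    (h0 : pvBal ('{' :: rest) = 0) :
    ∃ Q R, rest = Q ++ '}' :: R ∧ pvBal Q = 0 ∧ (∀ t, t <+: Q → 0 ≤ pvBal t) ∧
      pvBal R = 0 ∧ (∀ t, t <+: R → 0 ≤ pvBal t) := by
  have hrest : pvBal rest = -1 := by
    rw [pvBal_cons, pvBal_single] at h0
    simp at h0
    omega
  obtain ⟨n, _, he⟩ := bal_reach rest (-1) (by omega) (by omega)
  obtain ⟨m, _, _, hQ0, hQp, hdec⟩ := matched_run rest ⟨n, he⟩
  refine ⟨rest.take m, rest.drop (m + 1), hdec, hQ0, hQp, ?_, ?_⟩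
  · have := hrest
    conv at this => rw [hdec]
    rw [pvBal_append, pvBal_cons, pvBal_single] at this
    simp at this
    omega
  · intro t ht
    have hp : ('{' :: (rest.take m ++ '}' :: t)) <+: ('{' :: rest) := by
      conv_rhs => rw [hdec]
      exact List.cons_prefix_cons.mpr ⟨rfl,
        (List.prefix_append_right_inj _).mpr (List.cons_prefix_cons.mpr ⟨rfl, ht⟩)⟩
    have := hpre _ hp
    simp only [pvBal_cons', pvBal_append] at this
    norm_num at this
    rw [if_neg (by decide : ¬ ('}' : Char) = '{')] at this
    omega

-- ---- frame lemma: B's fold over a balanced segment restores the stack and appends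
-- the same transformed block to any two same-length outputs ----
theorem frame : ∀ (N : Nat) (P : List Char), P.length ≤ N →
    (∀ t, t <+: P → 0 ≤ pvBal t) → pvBal P = 0 →
    ∀ (o₁ o₂ : List Char) (st₁ st₂ : List (Nat × Bool)) (p : Bool),
      o₁.length = o₂.length →
      ∃ f q, P.foldl bStep (o₁, st₁, p) = (o₁ ++ f, st₁, q) ∧
             P.foldl bStep (o₂, st₂, p) = (o₂ ++ f, st₂, q) := by
  intro N
  induction N with
  | zero =>
      intro P hlen _ _ o₁ o₂ st₁ st₂ p _
      have : P = [] := List.eq_nil_of_length_eq_zero (by omega)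
      subst this
      exact ⟨[], p, by simp, by simp⟩
  | succ N' ih =>
      intro P hlen hpre h0 o₁ o₂ st₁ st₂ p hlen12
      cases P with
      | nil => exact ⟨[], p, by simp, by simp⟩
      | cons c rest =>
          by_cases hc : c = '}'
          · exfalso
            have := hpre [c] ⟨rest, rfl⟩
            rw [pvBal_single, hc] at this
            rw [if_neg (by decide : ¬ ('}' : Char) = '{'), if_pos rfl] at this
            exact absurd this (by norm_num)
          · by_cases hb : c = '{'
            · subst hb
              obtain ⟨Q, R, hQR, hQ0, hQp, hR0, hRp⟩ := dyck rest hpre h0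
              have hQRlen : rest.length = Q.length + (R.length + 1) := by
                simpa using congrArg List.length hQR
              have hlen' : rest.length + 1 ≤ N' + 1 := by simpa using hlen
              have hlenQ : Q.length ≤ N' := by omega
              have hlenR : R.length ≤ N' := by omega
              rw [hQR]
              simp only [List.foldl_cons, bStep_open, List.foldl_append]
              obtain ⟨f₁, q₁, he₁, he₂⟩ := ih Q hlenQ hQp hQ0
                (o₁ ++ ['{']) (o₂ ++ ['{'])
                ((o₁.length, p) :: st₁) ((o₂.length, p) :: st₂) false (by simp [hlen12])
              rw [he₁, he₂]
              cases p with
              | true =>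
                  rw [bStep_close_true, bStep_close_true,
                    show (o₁ ++ ['{'] ++ f₁).set o₁.length '(' = o₁ ++ ['('] ++ f₁ by
                      rw [List.append_assoc, List.append_assoc]; simp,
                    show (o₂ ++ ['{'] ++ f₁).set o₂.length '(' = o₂ ++ ['('] ++ f₁ by
                      rw [List.append_assoc, List.append_assoc]; simp]
                  obtain ⟨f₂, q₂, hf₁, hf₂⟩ := ih R hlenR hRp hR0
                    (o₁ ++ ['('] ++ f₁ ++ [')']) (o₂ ++ ['('] ++ f₁ ++ [')'])
                    st₁ st₂ false (by simp [hlen12])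
                  refine ⟨['('] ++ f₁ ++ [')'] ++ f₂, q₂, ?_, ?_⟩
                  · rw [hf₁]; simp
                  · rw [hf₂]; simp
              | false =>
                  rw [bStep_close_false, bStep_close_false]
                  obtain ⟨f₂, q₂, hf₁, hf₂⟩ := ih R hlenR hRp hR0
                    (o₁ ++ ['{'] ++ f₁ ++ ['}']) (o₂ ++ ['{'] ++ f₁ ++ ['}'])
                    st₁ st₂ false (by simp [hlen12])
                  refine ⟨['{'] ++ f₁ ++ ['}'] ++ f₂, q₂, ?_, ?_⟩
                  · rw [hf₁]; simp
                  · rw [hf₂]; simp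
            · -- ordinary character: neutral for the balance, plain append
              have hrest0 : pvBal rest = 0 := by
                have := h0
                rw [pvBal_cons', if_neg hb, if_neg hc] at this
                omega
              have hrestp : ∀ t, t <+: rest → 0 ≤ pvBal t := by
                intro t ht
                have := hpre (c :: t) (List.cons_prefix_cons.mpr ⟨rfl, ht⟩)
                rw [pvBal_cons', if_neg hb, if_neg hc] at this
                omega
              rw [List.foldl_cons, List.foldl_cons, bStep_other _ _ _ _ hb hc,
                bStep_other _ _ _ _ hb hc]
              obtain ⟨f₁, q₁, he₁, he₂⟩ := ih rest (by simpa using hlen) hrestp hrest0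
                (o₁ ++ [c]) (o₂ ++ [c]) st₁ st₂ (c == '^') (by simp [hlen12])
              refine ⟨c :: f₁, q₁, ?_, ?_⟩
              · rw [he₁]; simp
              · rw [he₂]; simp

-- ---- the crux: one A-rewrite does not change B's output ----
theorem crux (pre P suf : List Char) (hP0 : pvBal P = 0)
    (hPp : ∀ t, t <+: P → 0 ≤ pvBal t) :
    ((pre ++ '^' :: '{' :: P ++ '}' :: suf).foldl bStep ([], [], false)).1
      = ((pre ++ '^' :: '(' :: P ++ ')' :: suf).foldl bStep ([], [], false)).1 := by
  have s1 : ∀ (o : List Char) st p, bStep (o, st, p) '^' = (o ++ ['^'], st, true) := by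
    intro o st p; simp [bStep]
  have s2 : ∀ (o : List Char) st p, bStep (o, st, p) '(' = (o ++ ['('], st, false) := by
    intro o st p; simp [bStep]
  have s3 : ∀ (o : List Char) st p, bStep (o, st, p) ')' = (o ++ [')'], st, false) := by
    intro o st p; simp [bStep]
  rcases hfold : pre.foldl bStep ([], [], false) with ⟨o, st, p⟩
  have hstepL : List.foldl bStep (o, st, p) ('^' :: '{' :: P)
      = List.foldl bStep (o ++ ['^'] ++ ['{'], ((o ++ ['^']).length, true) :: st, false) P := by
    rw [List.foldl_cons, s1, List.foldl_cons, bStep_open]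
  have hL : List.foldl bStep ([], [], false) (pre ++ '^' :: '{' :: P ++ '}' :: suf)
      = List.foldl bStep
          (List.foldl bStep (o ++ ['^'] ++ ['{'], ((o ++ ['^']).length, true) :: st, false) P)
          ('}' :: suf) := by
    conv_lhs => rw [List.foldl_append, List.foldl_append, hfold, hstepL]
  have hstepR : List.foldl bStep (o, st, p) ('^' :: '(' :: P)
      = List.foldl bStep (o ++ ['^'] ++ ['('], st, false) P := by
    rw [List.foldl_cons, s1, List.foldl_cons, s2]
  have hR : List.foldl bStep ([], [], false) (pre ++ '^' :: '(' :: P ++ ')' :: suf)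
      = List.foldl bStep
          (List.foldl bStep (o ++ ['^'] ++ ['('], st, false) P)
          (')' :: suf) := by
    conv_lhs => rw [List.foldl_append, List.foldl_append, hfold, hstepR]
  obtain ⟨f, q, he₁, he₂⟩ := frame P.length P (le_refl _) hPp hP0
    (o ++ ['^'] ++ ['{']) (o ++ ['^'] ++ ['('])
    (((o ++ ['^']).length, true) :: st) st false (by simp)
  rw [show ((pre ++ '^' :: '{' :: P ++ '}' :: suf).foldl bStep ([], [], false)) =
      List.foldl bStep ([], [], false) (pre ++ '^' :: '{' :: P ++ '}' :: suf) from rfl,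
    show ((pre ++ '^' :: '(' :: P ++ ')' :: suf).foldl bStep ([], [], false)) =
      List.foldl bStep ([], [], false) (pre ++ '^' :: '(' :: P ++ ')' :: suf) from rfl,
    hL, hR, he₁, he₂, List.foldl_cons, bStep_close_true,
    show (o ++ ['^'] ++ ['{'] ++ f).set (o ++ ['^']).length '(' = o ++ ['^'] ++ ['('] ++ f by
      rw [List.append_assoc (o ++ ['^']), List.append_assoc (o ++ ['^'])]; simp,
    List.foldl_cons, s3]

-- ---- index/window lemmas for the in-place rewrite s = pre ++ ^{P} suf ↦ pre ++ ^(P) suf ----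
theorem lenW (pre P : List Char) (c : Char) :
    (pre ++ '^' :: c :: P).length = pre.length + 2 + P.length := by
  simp only [List.length_append, List.length_cons]
  omega
theorem getW (pre P suf : List Char) (c d : Char) (k : Nat) :
    (pre ++ '^' :: c :: P ++ d :: suf)[k]? =
      if k < pre.length then pre[k]?
      else if k = pre.length then some '^'
      else if k = pre.length + 1 then some c
      else if k < pre.length + 2 + P.length then P[k - (pre.length + 2)]?
      else if k = pre.length + 2 + P.length then some d
      else suf[k - (pre.length + 3 + P.length)]? := by
  split_ifs with h1 h2 h3 h4 h5
  · rw [List.getElem?_append_left (by rw [lenW]; omega), List.getElem?_append_left h1]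
  · rw [List.getElem?_append_left (by rw [lenW]; omega),
      List.getElem?_append_right (by omega), h2]
    simp
  · rw [List.getElem?_append_left (by rw [lenW]; omega),
      List.getElem?_append_right (by omega), h3]
    simp
  · rw [List.getElem?_append_left (by rw [lenW]; omega),
      List.getElem?_append_right (by omega),
      show k - pre.length = (k - (pre.length + 2)) + 2 by omega]
    simp only [List.getElem?_cons_succ]
  · rw [List.getElem?_append_right (by rw [lenW]; omega), lenW,
      show k - (pre.length + 2 + P.length) = 0 by omega]
    simp
  · rw [List.getElem?_append_right (by rw [lenW]; omega), lenW,
      show k - (pre.length + 2 + P.length) = (k - (pre.length + 3 + P.length)) + 1 by omega]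
    simp
theorem dropMid (pre P suf : List Char) (c d : Char) (r : Nat) (hr : r ≤ P.length) :
    (pre ++ '^' :: c :: P ++ d :: suf).drop (pre.length + 2 + r) = P.drop r ++ d :: suf := by
  rw [List.drop_append, lenW, show pre.length + 2 + r - (pre.length + 2 + P.length) = 0 by omega,
    List.drop_zero, List.drop_append,
    List.drop_eq_nil_of_le (show pre.length ≤ pre.length + 2 + r by omega), List.nil_append,
    show pre.length + 2 + r - pre.length = (r + 1) + 1 by omega,
    List.drop_succ_cons, List.drop_succ_cons]
theorem dropHigh (pre P suf : List Char) (c d : Char) (k : Nat) :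
    (pre ++ '^' :: c :: P ++ d :: suf).drop (pre.length + 3 + P.length + k) = suf.drop k := by
  rw [List.drop_append, lenW,
    List.drop_eq_nil_of_le (by rw [lenW]; omega), List.nil_append,
    show pre.length + 3 + P.length + k - (pre.length + 2 + P.length) = k + 1 by omega,
    List.drop_succ_cons]
theorem takeMid (pre P suf : List Char) (c d : Char) (r k : Nat) (hrk : r + k ≤ P.length) :
    ((pre ++ '^' :: c :: P ++ d :: suf).drop (pre.length + 2 + r)).take k
      = (P.drop r).take k := by
  rw [dropMid pre P suf c d r (by omega), List.take_append,
    show k - (P.drop r).length = 0 by simp only [List.length_drop]; omega]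
  simp
theorem isPowAt_iff (t : List Char) (i : Nat) :
    isPowAt t i ↔ (t[i]? = some '^' ∧ t[i + 1]? = some '{') := by
  unfold isPowAt
  have h0 : t[i]? = (t.drop i)[0]? := by simp
  have h1 : t[i + 1]? = (t.drop i)[1]? := by
    rw [List.getElem?_drop]
  rw [h0, h1]
  cases hl : t.drop i with
  | nil => simp
  | cons a l' =>
      cases l' with
      | nil => simp
      | cons b l'' => simp [List.take]
theorem insideP (P : List Char) (hP0 : pvBal P = 0) (hPp : ∀ t, t <+: P → 0 ≤ pvBal t)
    (r : Nat) (hr : r < P.length) (hc : P[r]? = some '{') :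
    ∃ n, n ≤ P.length - (r + 1) ∧ pvBal ((P.drop (r + 1)).take n) = -1 := by
  have hg : P[r] = '{' := by
    have := List.getElem?_eq_getElem hr
    rw [this] at hc
    exact Option.some_injective _ hc
  have ht : P.take (r + 1) = P.take r ++ [P[r]] := List.take_succ_eq_append_getElem hr
  have hb1 : 1 ≤ pvBal (P.take (r + 1)) := by
    rw [ht, pvBal_append, pvBal_single, hg, if_pos rfl]
    have := hPp (P.take r) (List.take_prefix r P)
    omega
  have hsplit : pvBal (P.take (r + 1)) + pvBal (P.drop (r + 1)) = 0 := by
    rw [← pvBal_append, List.take_append_drop, hP0]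
  obtain ⟨n, hn, he⟩ := bal_reach (P.drop (r + 1)) (-1) (by omega) (by omega)
  exact ⟨n, by rw [List.length_drop] at hn; omega, he⟩
theorem matcher_unique (t : List Char) (j p p' : Nat)
    (h1 : matcherAt t j p) (h2 : matcherAt t j p') : p = p' := by
  obtain ⟨-, hle1, hb1, hpre1⟩ := h1
  obtain ⟨-, hle2, hb2, hpre2⟩ := h2
  by_contra hne
  rcases Nat.lt_or_ge p p' with h | h
  · have := hpre2 (p - (j + 2) + 1) (by omega)
    rw [hb1] at this
    omega
  · have hlt : p' < p := by omega
    have := hpre1 (p' - (j + 2) + 1) (by omega)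
    rw [hb2] at this
    omega
theorem matcherAt_start (pre P suf : List Char) (hP0 : pvBal P = 0)
    (hPp : ∀ t, t <+: P → 0 ≤ pvBal t) :
    matcherAt (pre ++ '^' :: '{' :: P ++ '}' :: suf) pre.length
      (pre.length + 2 + P.length) := by
  have hdrop : (pre ++ '^' :: '{' :: P ++ '}' :: suf).drop (pre.length + 2) = P ++ '}' :: suf := by
    have := dropMid pre P suf '{' '}' 0 (by omega)
    simpa using this
  refine ⟨?_, by omega, ?_, ?_⟩
  · rw [isPowAt_iff, getW, getW]
    rw [if_neg (by omega), if_pos rfl, if_neg (by omega), if_neg (by omega), if_pos rfl]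
    exact ⟨rfl, rfl⟩
  · rw [hdrop, show pre.length + 2 + P.length - (pre.length + 2) + 1 = P.length + 1 by omega,
      List.take_append, List.take_of_length_le (by omega),
      show P.length + 1 - P.length = 1 by omega,
      show ('}' :: suf).take 1 = ['}'] by simp,
      pvBal_append, pvBal_single, hP0,
      if_neg (by decide : ¬ ('}' : Char) = '{'), if_pos rfl]
    norm_num
  · intro k hk
    rw [show pre.length + 2 + P.length - (pre.length + 2) = P.length by omega] at hk
    rw [hdrop, List.take_append, show k - P.length = 0 by omega]
    simp only [List.take_zero, List.append_nil]
    exact hPp _ (List.take_prefix _ _)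
theorem preserveInv (pre P suf : List Char)
    (hmin : ∀ j < pre.length, ¬ isPowAt (pre ++ '^' :: '{' :: P ++ '}' :: suf) j)
    (hP0 : pvBal P = 0) (hPp : ∀ t, t <+: P → 0 ≤ pvBal t)
    (hInv : pvInv (pre ++ '^' :: '{' :: P ++ '}' :: suf)) :
    pvInv (pre ++ '^' :: '(' :: P ++ ')' :: suf) := by
  intro i hi hui p hp
  have dropEqHigh : ∀ a, pre.length + 3 + P.length ≤ a →
      (pre ++ '^' :: '(' :: P ++ ')' :: suf).drop a
        = (pre ++ '^' :: '{' :: P ++ '}' :: suf).drop a := by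
    intro a ha
    rw [show a = pre.length + 3 + P.length + (a - (pre.length + 3 + P.length)) by omega,
      dropHigh, dropHigh]
  -- facts about the position p of the '}'
  have hpfacts : (pre ++ '^' :: '{' :: P ++ '}' :: suf)[p]? = some '}' ∧
      p ≠ pre.length + 2 + P.length := by
    have h1 := getW pre P suf '(' ')' p
    have h2 := getW pre P suf '{' '}' p
    rw [hp] at h1
    split_ifs at h1 h2 with a1 a2 a3 a4 a5
    · exact ⟨h2.trans h1.symm, by omega⟩
    · exact absurd h1 (by simp)
    · exact absurd h1 (by simp)
    · exact ⟨h2.trans h1.symm, by omega⟩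
    · exact absurd h1 (by simp)
    · exact ⟨h2.trans h1.symm, by omega⟩
  obtain ⟨hi1, hi2⟩ := (isPowAt_iff _ _).mp hi
  have g0 := getW pre P suf '(' ')' i
  have g1 := getW pre P suf '(' ')' (i + 1)
  rw [hi1] at g0
  rw [hi2] at g1
  by_cases hhigh : pre.length + 3 + P.length ≤ i
  · -- the unmatched occurrence lies beyond the rewritten window
    have e0 := dropEqHigh i (by omega)
    have e2 := dropEqHigh (i + 2) (by omega)
    have hiS : isPowAt (pre ++ '^' :: '{' :: P ++ '}' :: suf) i := by
      unfold isPowAt at hi ⊢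
      rw [← e0]
      exact hi
    have huiS : ¬ matchedAt' (pre ++ '^' :: '{' :: P ++ '}' :: suf) i := by
      intro ⟨n, hn⟩
      exact hui ⟨n, by rw [e2]; exact hn⟩
    obtain ⟨j, hji, hmj⟩ := hInv i hiS huiS p hpfacts.1
    obtain ⟨hj1, hj2⟩ := (isPowAt_iff _ _).mp hmj.1
    have f0 := getW pre P suf '{' '}' j
    have f1 := getW pre P suf '{' '}' (j + 1)
    rw [hj1] at f0
    rw [hj2] at f1
    refine ⟨j, hji, ?_⟩
    split_ifs at f1 with c1 c2 c3 c4 c5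
    · exact absurd hmj.1 (hmin j (by omega))
    · exact absurd f1 (by simp)
    · -- j = pre.length : its matcher is the rewritten '}', excluded for p
      have hjL : j = pre.length := by omega
      rw [hjL] at hmj
      exact absurd (matcher_unique _ _ _ _ hmj (matcherAt_start pre P suf hP0 hPp))
        hpfacts.2
    · -- the matched helper occurrence lies inside P
      have hjge : pre.length + 2 ≤ j := by
        by_contra hlt
        have hjL1 : j = pre.length + 1 := by omega
        rw [if_neg (by omega), if_neg (by omega), if_pos hjL1] at f0
        exact absurd f0 (by simp)
      have hc : P[j + 1 - (pre.length + 2)]? = some '{' := f1.symm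
      obtain ⟨n, hn, he⟩ := insideP P hP0 hPp (j + 1 - (pre.length + 2)) (by omega) hc
      have hj2eq : j + 2 = pre.length + 2 + (j + 1 - (pre.length + 2) + 1) := by omega
      have hwinS : ∀ k, k ≤ n →
          ((pre ++ '^' :: '{' :: P ++ '}' :: suf).drop (j + 2)).take k
            = (P.drop (j + 1 - (pre.length + 2) + 1)).take k := by
        intro k hk
        rw [hj2eq]
        exact takeMid pre P suf '{' '}' _ k (by omega)
      have hwinS' : ∀ k, k ≤ n →
          ((pre ++ '^' :: '(' :: P ++ ')' :: suf).drop (j + 2)).take k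
            = (P.drop (j + 1 - (pre.length + 2) + 1)).take k := by
        intro k hk
        rw [hj2eq]
        exact takeMid pre P suf '(' ')' _ k (by omega)
      have hplt : p - (j + 2) < n := by
        by_contra hge
        have h1 := hmj.2.2.2 n (by omega)
        rw [hwinS n (le_refl n), he] at h1
        omega
      refine ⟨?_, hmj.2.1, ?_, ?_⟩
      · rw [isPowAt_iff]
        constructor
        · rw [getW, if_neg (by omega), if_neg (by omega), if_neg (by omega),
            if_pos (by omega)]
          rw [if_neg (by omega), if_neg (by omega), if_neg (by omega),
            if_pos (by omega)] at f0
          exact f0.symm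
        · rw [getW, if_neg (by omega), if_neg (by omega), if_neg (by omega),
            if_pos (by omega)]
          exact f1.symm
      · rw [hwinS' _ (by omega), ← hwinS _ (by omega)]
        exact hmj.2.2.1
      · intro k hk
        rw [hwinS' _ (by omega), ← hwinS _ (by omega)]
        exact hmj.2.2.2 k hk
    · exact absurd f1 (by simp)
    · -- the helper occurrence lies beyond the rewritten window too
      have hjq : pre.length + 2 + P.length < j := by
        by_contra hle
        have hjq' : j = pre.length + 2 + P.length := by omega
        rw [if_neg (by omega), if_neg (by omega), if_neg (by omega), if_neg (by omega),
          if_pos hjq'] at f0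
        exact absurd f0 (by simp)
      have ej2 := dropEqHigh (j + 2) (by omega)
      have ej0 := dropEqHigh j (by omega)
      refine ⟨?_, hmj.2.1, ?_, ?_⟩
      · unfold isPowAt
        rw [ej0]
        exact hmj.1
      · rw [ej2]
        exact hmj.2.2.1
      · intro k hk
        rw [ej2]
        exact hmj.2.2.2 k hk
  · -- below the window the occurrence is impossible or matched: contradiction
    exfalso
    split_ifs at g1 with b1 b2 b3 b4 b5
    · -- inside pre: contradicts minimality of the rewritten occurrence
      refine hmin i (by omega) ?_
      rw [isPowAt_iff]
      constructor
      · rw [getW, if_pos (by omega)]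
        rw [if_pos (by omega)] at g0
        exact g0.symm
      · rw [getW, if_pos b1]
        exact g1.symm
    · exact absurd g1 (by simp)
    · exact absurd g1 (by simp)
    · -- inside P: the occurrence is matched inside P, contradicting hui
      have hige : pre.length + 2 ≤ i := by
        by_contra hlt
        have hiL1 : i = pre.length + 1 := by omega
        rw [if_neg (by omega), if_neg (by omega), if_pos hiL1] at g0
        exact absurd g0 (by simp)
      have hc : P[i + 1 - (pre.length + 2)]? = some '{' := g1.symm
      obtain ⟨n, hn, he⟩ := insideP P hP0 hPp (i + 1 - (pre.length + 2)) (by omega) hc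
      refine hui ⟨n, ?_⟩
      rw [show i + 2 = pre.length + 2 + (i + 1 - (pre.length + 2) + 1) by omega,
        takeMid pre P suf '(' ')' _ n (by omega)]
      exact he
    · exact absurd g1 (by simp)
    · -- i = the closing position: impossible
      have hiq : i = pre.length + 2 + P.length := by omega
      rw [if_neg (by omega), if_neg (by omega), if_neg (by omega), if_neg (by omega),
        if_pos hiq] at g0
      exact absurd g0 (by simp)

-- ---- '{' occurrence forces membership ----
theorem isPowAt_mem (s : List Char) (i : Nat) (h : isPowAt s i) : '{' ∈ s := by
  rw [isPowAt_decomp s i h]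
  simp

-- ---- main induction: A's loop, run to completion, equals B's single pass ----
theorem mainLemma : ∀ (fuel : Nat) (s : List Char),
    pvInv s → s.count '{' < fuel →
    aLoop fuel s = (s.foldl bStep ([], [], false)).1 := by
  intro fuel
  induction fuel with
  | zero => intro s _ hc; omega
  | succ n ih =>
      intro s hInv hc
      by_cases hg : '{' ∈ s ∧ '}' ∈ s
      · cases hfp : findPow s with
        | none =>
            rw [aLoop, if_pos hg, hfp]
            exact ((fold_no_pow s [] [] false hfp (by simp) (by simp)).trans (List.nil_append s)).symm
        | some start =>
            obtain ⟨hpow, hmin⟩ := findPow_some_spec s start hfp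
            have hmt : matchedAt' s start := by
              by_contra hum
              obtain ⟨pp, hpl, hpe⟩ := List.mem_iff_getElem.mp hg.2
              obtain ⟨j, hj, hmj⟩ := hInv start hpow hum pp
                (by rw [List.getElem?_eq_getElem hpl, hpe])
              exact hmin j hj hmj.1
            obtain ⟨m, hmlt, hrun, hbal0, hprefQ, hsplit⟩ := matched_run (s.drop (start + 2)) hmt
            have hlen : start + 2 ≤ s.length := isPowAt_len _ _ hpow
            have hprelen : (s.take start).length = start := by rw [List.length_take]; omega
            have hsuf : s.drop (start + 2 + (m + 1)) = (s.drop (start + 2)).drop (m + 1) :=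
              (List.drop_drop).symm
            have hsdec : s = s.take start ++ '^' :: '{' :: (s.drop (start + 2)).take m
                ++ '}' :: (s.drop (start + 2)).drop (m + 1) := by
              conv_lhs => rw [isPowAt_decomp s start hpow]
              conv_lhs => rw [hsplit]
              simp
            rw [aLoop, if_pos hg, hfp]
            simp only [hrun, Nat.add_sub_cancel, hsuf]
            have hInv' : pvInv (s.take start ++ '^' :: '(' :: (s.drop (start + 2)).take m
                ++ ')' :: (s.drop (start + 2)).drop (m + 1)) := by
              apply preserveInv
              · intro j hj
                rw [hprelen] at hj
                rw [← hsdec]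
                exact hmin j hj
              · exact hbal0
              · exact hprefQ
              · rw [← hsdec]
                exact hInv
            have hcount : s.count '{' = (s.take start ++ '^' :: '(' ::
                (s.drop (start + 2)).take m ++ ')' :: (s.drop (start + 2)).drop (m + 1)).count '{'
                + 1 := by
              conv_lhs => rw [hsdec]
              simp [List.count_append]
              omega
            rw [ih _ hInv' (by omega)]
            conv_rhs => rw [hsdec]
            exact (crux (s.take start) ((s.drop (start + 2)).take m)
              ((s.drop (start + 2)).drop (m + 1)) hbal0 hprefQ).symm
      · rw [aLoop, if_neg hg]
        by_cases hclose : '}' ∈ s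
        · have hopen : '{' ∉ s := fun h => hg ⟨h, hclose⟩
          have hfp : findPow s = none := by
            cases hfp : findPow s with
            | none => rfl
            | some k => exact absurd (isPowAt_mem s k (findPow_some_spec s k hfp).1) hopen
          exact ((fold_no_pow s [] [] false hfp (by simp) (by simp)).trans (List.nil_append s)).symm
        · exact ((fold_no_close s [] [] false hclose).trans (List.nil_append s)).symm

theorem pre_to_inv (expr : String) (h : Pre_process_latex expr) : pvInv expr.toList := by
  intro i hi hui p hp
  have hil : i < expr.toList.length := by
    have := isPowAt_len _ _ hi
    omega
  have hpl : p < expr.toList.length := by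
    by_contra hge
    rw [List.getElem?_eq_none (by omega)] at hp
    exact absurd hp (by simp)
  have hgd : expr.toList.getD p ' ' = '}' := by
    rw [List.getD_eq_getElem?_getD, hp]
    rfl
  exact h i hil hi (fun ⟨nn, _, hn⟩ => hui ⟨nn, hn⟩) p hpl hgd

-- ===== VERDICT (by name: the statement is the Claim_ definition above) =====
theorem process_latex_spec : Claim_equal_process_latex := by
  intro expr _ hpre
  unfold Spec_process_latex process_latex process_latex_alt
  exact congrArg String.ofList (mainLemma _ _ (pre_to_inv expr hpre) (by omega))
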